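-- pv_equiv track=rewrite | github.com/naphattar/Comp_prog_2021-1 | Grader/P2_03_Func2.py | is_heterogram
-- ===== SOURCE A (Python) =====
-- def is_heterogram(s):
--     alphabet ="abcdefghijklmnopqrstuvwxyz"
--     word = s.lower()
--     ans = 0
--     alpha = {}
--     for i in range(26):
--         alpha[alphabet[i]] = 0
--     for i in word:
--         if i in alphabet:
--             alpha[i] = alpha[i]+1
--     for i in word:
--         if i in alphabet:
--             if alpha[i] > 1:
--                 ans = ans+1
--     if ans >0 :
--         return False
--     else:
--         return True
-- ===== SOURCE B (Python) =====
-- def is_heterogram(s):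
--     letters = [c for c in s.lower() if c in "abcdefghijklmnopqrstuvwxyz"]
--     return len(set(letters)) == len(letters)
-- ===== Notes on version B (the rewrite author's own statement) =====
-- stated objective: simpler
-- what changed: Replaces A's three passes (pre-initialise a 26-key count table, count letters, rescan counting letters whose count exceeds 1) with one filter of the lowercased string to a-z letters plus a set-size comparison len(set(letters)) == len(letters).
import Mathlib
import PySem

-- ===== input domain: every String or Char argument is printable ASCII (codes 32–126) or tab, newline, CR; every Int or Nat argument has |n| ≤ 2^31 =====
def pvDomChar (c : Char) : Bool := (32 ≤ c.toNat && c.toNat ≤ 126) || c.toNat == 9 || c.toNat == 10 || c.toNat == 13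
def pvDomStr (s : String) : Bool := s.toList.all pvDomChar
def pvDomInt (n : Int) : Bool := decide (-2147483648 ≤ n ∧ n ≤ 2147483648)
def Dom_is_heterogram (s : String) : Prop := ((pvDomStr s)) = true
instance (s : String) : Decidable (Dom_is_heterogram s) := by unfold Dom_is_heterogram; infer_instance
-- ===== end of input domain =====

-- B replaces A's count-table-then-rescan with a filter of the lowercased string plus a set-size comparison (simpler).

-- ===== PORT A =====
def is_heterogram (s : String) : Bool :=
  let alphabet : List Char := "abcdefghijklmnopqrstuvwxyz".toList
  let word : List Char := (PySem.Str.lower s).toList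
  let alpha0 : PySem.Dict Char Int :=
    (PySem.List.pyRange 0 26 1).foldl
      (fun d i => d.insert (PySem.List.pyGetD alphabet i ' ') 0) PySem.Dict.empty
  let alpha : PySem.Dict Char Int :=
    word.foldl (fun d i => if alphabet.contains i then d.insert i (d.getD i 0 + 1) else d) alpha0
  let ans : Int :=
    word.foldl (fun a i => if alphabet.contains i then (if alpha.getD i 0 > 1 then a + 1 else a) else a) 0
  if ans > 0 then false else true

-- ===== PORT B =====
def is_heterogram_alt (s : String) : Bool :=
  let letters : List Char :=
    (PySem.Str.lower s).toList.filter (fun c => "abcdefghijklmnopqrstuvwxyz".toList.contains c)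
  PySem.Set.len (PySem.Set.ofList letters) == letters.length

-- ===== PRECONDITION & SPEC =====
def Spec_is_heterogram (s : String) (out : Bool) : Prop := out = is_heterogram_alt s
instance (s : String) (out : Bool) : Decidable (Spec_is_heterogram s out) := by unfold Spec_is_heterogram; infer_instance

-- ===== CLAIM (what is proved, stated in full; the proofs are below) =====
def Claim_equal_is_heterogram : Prop := ∀ (s : String), Dom_is_heterogram s → Spec_is_heterogram s (is_heterogram s)

-- ===== LEMMAS AND PROOFS =====

-- a dict built by inserting only zeros answers 0 to every getD … 0
theorem getD_foldl_insert_zero (l : List Int) (g : Int → Char) (d : PySem.Dict Char Int)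
    (v : Char) (h : d.getD v 0 = 0) :
    (l.foldl (fun d i => d.insert (g i) 0) d).getD v 0 = 0 := by
  induction l generalizing d with
  | nil => simpa using h
  | cons a t ih =>
    simp only [List.foldl_cons]
    exact ih _ (by rw [PySem.Dict.getD_insert]; split <;> simp [h])

-- A's third loop computed as a countP over the kept letters
theorem ans_eq (w A : List Char) (alpha : PySem.Dict Char Int)
    (h : ∀ v, alpha.getD v 0 = ((w.filter (fun c => A.contains c)).count v : Int)) :
    w.foldl (fun a i => if A.contains i then (if 1 < alpha.getD i 0 then a + 1 else a) else a) 0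
      = ((w.filter (fun c => A.contains c)).countP
          (fun i => decide ((1:Int) < ((w.filter (fun c => A.contains c)).count i : Int))) : Int) := by
  rw [List.foldl_ext _
        (fun a i => if A.contains i then
          (if (1:Int) < ((w.filter (fun c => A.contains c)).count i : Int) then a + 1 else a) else a)
        0 (by intro a b _; rw [h b])]
  rw [← List.foldl_filter]
  rw [PySem.List.foldl_ite_add_one
        (fun i => (1:Int) < ((w.filter (fun c => A.contains c)).count i : Int))]
  rw [zero_add, List.filter_congr (fun c _ => List.contains_eq_mem c A)]

-- upper bound for the set-building fold
theorem foldl_add_length_le (t : List Char) : ∀ s : List Char,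
    (t.foldl PySem.Set.add s).length ≤ s.length + t.length := by
  induction t with
  | nil => intro s; simp
  | cons a r ih =>
    intro s
    simp only [List.foldl_cons, PySem.Set.add]
    split
    · calc (r.foldl PySem.Set.add s).length ≤ s.length + r.length := ih s
        _ ≤ s.length + (a :: r).length := by simp
    · calc (r.foldl PySem.Set.add (s ++ [a])).length ≤ (s ++ [a]).length + r.length := ih _
        _ = s.length + (a :: r).length := by simp; omega

theorem foldl_add_length_eq (t : List Char) : ∀ s : List Char,
    t.Nodup → (∀ x ∈ t, x ∉ s) →
    (t.foldl PySem.Set.add s).length = s.length + t.length := by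
  induction t with
  | nil => intro s _ _; simp
  | cons a r ih =>
    intro s hnd hdisj
    have has : List.contains s a = false := by
      simpa using hdisj a (List.mem_cons_self)
    simp only [List.foldl_cons, PySem.Set.add, PySem.Set.contains, has,
      Bool.false_eq_true, if_false]
    rw [ih (s ++ [a]) (List.nodup_cons.mp hnd).2]
    · simp [List.length_cons]; omega
    · intro x hx
      simp only [List.mem_append, List.mem_singleton]
      rintro (h | rfl)
      · exact hdisj x (List.mem_cons_of_mem _ hx) h
      · exact (List.nodup_cons.mp hnd).1 hx

theorem foldl_add_length_lt (t : List Char) : ∀ s : List Char,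
    ((∃ x ∈ t, x ∈ s) ∨ ¬ t.Nodup) →
    (t.foldl PySem.Set.add s).length < s.length + t.length := by
  induction t with
  | nil =>
    intro s h
    rcases h with ⟨x, hx, _⟩ | hnd
    · simp at hx
    · simp at hnd
  | cons a r ih =>
    intro s h
    simp only [List.foldl_cons, PySem.Set.add, PySem.Set.contains]
    by_cases has : List.contains s a
    · simp only [has, if_true]
      calc (r.foldl PySem.Set.add s).length ≤ s.length + r.length := foldl_add_length_le r s
        _ < s.length + (a :: r).length := by simp
    · simp only [has]
      have key : (∃ x ∈ r, x ∈ s ++ [a]) ∨ ¬ r.Nodup := by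
        rcases h with ⟨x, hx, hxs⟩ | hnd
        · rcases List.mem_cons.mp hx with rfl | hxr
          · exact absurd (List.contains_iff_mem.mpr hxs) (by simpa using has)
          · exact Or.inl ⟨x, hxr, List.mem_append_left _ hxs⟩
        · by_cases har : a ∈ r
          · exact Or.inl ⟨a, har, List.mem_append_right _ (List.mem_singleton.mpr rfl)⟩
          · exact Or.inr (fun hr => hnd (List.nodup_cons.mpr ⟨har, hr⟩))
      calc (r.foldl PySem.Set.add (s ++ [a])).length < (s ++ [a]).length + r.length := ih _ key
        _ = s.length + (a :: r).length := by simp; omega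

-- length of set(L) equals length of L iff L has no duplicates
theorem ofList_length_eq_iff (L : List Char) :
    (PySem.Set.ofList L).length = L.length ↔ L.Nodup := by
  rw [PySem.Set.ofList_eq_foldl]
  constructor
  · intro h
    by_contra hnd
    have := foldl_add_length_lt L [] (Or.inr hnd)
    simp at this; omega
  · intro hnd
    have := foldl_add_length_eq L [] hnd (by simp)
    simpa using this

theorem A_char (s : String) :
    is_heterogram s = decide (((PySem.Str.lower s).toList.filter
      (fun c => ("abcdefghijklmnopqrstuvwxyz".toList).contains c)).Nodup) := by
  unfold is_heterogram
  simp only [gt_iff_lt]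
  set A : List Char := "abcdefghijklmnopqrstuvwxyz".toList with hA
  set w : List Char := (PySem.Str.lower s).toList with hw
  set L : List Char := w.filter (fun c => A.contains c) with hL
  have halpha : ∀ v : Char,
      (w.foldl (fun d i => if A.contains i then d.insert i (d.getD i 0 + 1) else d)
        ((PySem.List.pyRange 0 26 1).foldl
          (fun d i => d.insert (PySem.List.pyGetD A i ' ') 0) PySem.Dict.empty)).getD v 0
      = (L.count v : Int) := by
    intro v
    rw [← List.foldl_filter (p := fun c => A.contains c)
          (f := fun (d : PySem.Dict Char Int) i => d.insert i (d.getD i 0 + 1)),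
        PySem.Dict.getD_foldl_insert_add_one,
        getD_foldl_insert_zero _ _ _ _ rfl, zero_add]
  rw [ans_eq w A _ halpha, ← hL]
  by_cases hnd : L.Nodup
  · have hc : L.countP (fun i => decide ((1:Int) < (L.count i : Int))) = 0 := by
      rw [List.countP_eq_zero]
      intro x _
      have := List.nodup_iff_count_le_one.mp hnd x
      simp; omega
    have hneg : ¬ ((0:Int) < (L.countP (fun i => decide ((1:Int) < (L.count i : Int))) : Int)) := by
      rw [hc]; simp
    rw [if_neg hneg]
    exact (decide_eq_true hnd).symm
  · obtain ⟨x, hx⟩ : ∃ x, ¬ L.count x ≤ 1 := by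
      by_contra h
      push Not at h
      exact hnd (List.nodup_iff_count_le_one.mpr (fun a => h a))
    have hxm : x ∈ L := List.count_pos_iff.mp (by omega)
    have hc : 0 < L.countP (fun i => decide ((1:Int) < (L.count i : Int))) := by
      rw [List.countP_pos_iff]
      exact ⟨x, hxm, by simp; omega⟩
    have hc' : (0:Int) < (L.countP (fun i => decide ((1:Int) < (L.count i : Int))) : Int) := by
      exact_mod_cast hc
    rw [if_pos hc']
    exact (decide_eq_false hnd).symm

theorem B_char (s : String) :
    is_heterogram_alt s = decide (((PySem.Str.lower s).toList.filter
      (fun c => ("abcdefghijklmnopqrstuvwxyz".toList).contains c)).Nodup) := by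
  unfold is_heterogram_alt
  simp only [PySem.Set.len]
  set L : List Char := (PySem.Str.lower s).toList.filter
      (fun c => ("abcdefghijklmnopqrstuvwxyz".toList).contains c) with hL
  by_cases hnd : L.Nodup
  · have := (ofList_length_eq_iff L).mpr hnd
    simp [this, hnd]
  · have hlt : (PySem.Set.ofList L).length < L.length :=
      lt_of_le_of_ne
        (by rw [PySem.Set.ofList_eq_foldl]; simpa using foldl_add_length_le L [])
        (fun h => hnd ((ofList_length_eq_iff L).mp h))
    have : ((PySem.Set.ofList L).length : Int) ≠ (L.length : Int) := by
      exact_mod_cast Nat.ne_of_lt hlt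
    simp [this, hnd]

-- ===== VERDICT (by name: the statement is the Claim_ definition above) =====
theorem is_heterogram_spec : Claim_equal_is_heterogram := by
  intro s _
  show is_heterogram s = is_heterogram_alt s
  rw [A_char, B_char]
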